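-- pv_equiv track=rewrite | github.com/ShajahanAI/codewars | python/7 kyu/33.py | martingale
-- ===== SOURCE A (Python) =====
-- def martingale(bank, outcomes):
--     stake = 100
--     for outcome in outcomes:
--         win = outcome
--         if win:
--             bank += stake
--             stake = 100
--         else:
--             bank -= stake
--             stake *= 2
--
--     return bank
-- ===== SOURCE B (Python) =====
-- def martingale(bank, outcomes):
--     outs = list(outcomes)
--     wins = sum(1 for o in outs if o)
--     trailing = 0
--     for o in reversed(outs):
--         if o:
--             break
--         trailing += 1
--     return bank + 100 * wins - 100 * (2 ** trailing - 1)
-- ===== Notes on version B (the rewrite author's own statement) =====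
-- stated objective: alternative
-- what changed: Replaces the stateful stake-doubling simulation by a closed form: count wins and the trailing loss run, return bank + 100*wins - 100*(2**trailing - 1).
import Mathlib
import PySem

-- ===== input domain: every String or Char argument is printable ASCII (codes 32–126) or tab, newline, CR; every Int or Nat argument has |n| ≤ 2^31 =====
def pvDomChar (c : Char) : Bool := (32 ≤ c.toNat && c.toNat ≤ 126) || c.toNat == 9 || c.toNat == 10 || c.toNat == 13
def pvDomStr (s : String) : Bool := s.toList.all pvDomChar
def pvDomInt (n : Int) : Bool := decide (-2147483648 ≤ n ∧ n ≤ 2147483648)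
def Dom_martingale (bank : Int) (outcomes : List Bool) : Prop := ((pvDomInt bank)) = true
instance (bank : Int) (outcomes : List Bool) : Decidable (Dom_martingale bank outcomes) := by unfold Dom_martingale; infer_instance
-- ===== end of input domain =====

-- ===== PORT A =====
-- Literal port of A: fold over outcomes with state (bank, stake).
def martingale (bank : Int) (outcomes : List Bool) : Int :=
  (outcomes.foldl
    (fun (st : Int × Int) (outcome : Bool) =>
      if outcome then (st.1 + st.2, 100) else (st.1 - st.2, st.2 * 2))
    (bank, 100)).1

-- ===== PORT B =====
-- Port of B: closed form from win count and trailing loss-run length.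
def martingale_alt (bank : Int) (outcomes : List Bool) : Int :=
  let wins : Int := (outcomes.filter (fun o => o)).length
  let trailing : Nat := (outcomes.reverse.takeWhile (fun o => !o)).length
  bank + 100 * wins - 100 * (2 ^ trailing - 1)

-- ===== PRECONDITION & SPEC =====
def Spec_martingale (bank : Int) (outcomes : List Bool) (out : Int) : Prop := out = martingale_alt bank outcomes
instance (bank : Int) (outcomes : List Bool) (out : Int) : Decidable (Spec_martingale bank outcomes out) := by unfold Spec_martingale; infer_instance

-- ===== CLAIM (what is proved, stated in full; the proofs are below) =====
def Claim_equal_martingale : Prop := ∀ (bank : Int) (outcomes : List Bool), Dom_martingale bank outcomes → Spec_martingale bank outcomes (martingale bank outcomes)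

-- ===== LEMMAS AND PROOFS =====

-- ===== VERDICT (by name: the statement is the Claim_ definition above) =====
-- loop invariant: after folding xs from (b,100), bank = b + 100*W - 100*(2^T - 1)
-- and stake = 100*2^T, where W = #wins in xs and T = trailing loss-run of xs.
theorem martingale_fold_inv (b : Int) (xs : List Bool) :
    (xs.foldl
      (fun (st : Int × Int) (outcome : Bool) =>
        if outcome then (st.1 + st.2, 100) else (st.1 - st.2, st.2 * 2))
      (b, 100)) =
    (b + 100 * ((xs.filter (fun o => o)).length : Int)
       - 100 * (2 ^ (xs.reverse.takeWhile (fun o => !o)).length - 1),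
     100 * 2 ^ (xs.reverse.takeWhile (fun o => !o)).length) := by
  induction xs using List.reverseRecOn with
  | nil => simp
  | append_singleton ys x ih =>
    cases x <;>
      simp [List.foldl_append, ih, List.filter_append, pow_succ, mul_add] <;>
      first
      | exact ⟨trivial, trivial⟩
      | (constructor <;> ring)
      | ring

theorem martingale_spec : Claim_equal_martingale := by
  intro bank outcomes _
  unfold Spec_martingale martingale martingale_alt
  rw [martingale_fold_inv]
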